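-- pv_equiv track=rewrite | github.com/PavelShpagin/AQUA | annotations/generate_report.py | has_edit_level_ties
-- ===== SOURCE A (Python) =====
-- def has_edit_level_ties(edit_labels):
--     """Check if any edit has ties in annotator labels"""
--     for edit_counts in edit_labels:
--         if not edit_counts:
--             continue
--         max_count = max(edit_counts.values())
--         max_labels = [label for label, count in edit_counts.items() if count == max_count]
--         if len(max_labels) > 1:  # Tie detected
--             return True
--     return False
-- ===== SOURCE B (Python) =====
-- def has_edit_level_ties(edit_labels):
--     """Check if any edit has ties in annotator labels"""
--     for edit_counts in edit_labels:
--         if not edit_counts: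
--             continue
--         vals = sorted(edit_counts.values(), reverse=True)
--         if len(vals) >= 2 and vals[0] == vals[1]:
--             return True
--     return False
-- ===== Notes on version B (the rewrite author's own statement) =====
-- stated objective: alternative
-- what changed: Instead of computing the max of the counts and then building the list of labels attaining it, B sorts the counts in descending order and declares a tie when the two largest are equal.
import Mathlib
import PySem

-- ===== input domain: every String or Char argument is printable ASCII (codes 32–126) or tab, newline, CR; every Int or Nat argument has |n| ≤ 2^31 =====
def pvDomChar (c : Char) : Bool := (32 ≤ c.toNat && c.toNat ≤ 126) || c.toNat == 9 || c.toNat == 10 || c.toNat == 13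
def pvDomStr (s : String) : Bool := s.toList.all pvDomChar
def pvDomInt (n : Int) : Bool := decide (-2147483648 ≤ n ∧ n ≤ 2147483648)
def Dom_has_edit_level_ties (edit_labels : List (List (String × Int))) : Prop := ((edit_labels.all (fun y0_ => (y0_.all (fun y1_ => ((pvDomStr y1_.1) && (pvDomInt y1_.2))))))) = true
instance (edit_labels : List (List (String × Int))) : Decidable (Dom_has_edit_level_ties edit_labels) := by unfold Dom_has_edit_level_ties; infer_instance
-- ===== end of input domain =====

-- B replaces "max of the counts, then collect all labels attaining it" by
-- "sort the counts descending and compare the two largest" (alternative decomposition).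

-- ===== PORT A =====
-- for edit_counts in edit_labels: skip empty; max_count = max(values);
-- max_labels = [label for label, count in items if count == max_count]; tie if len > 1
def has_edit_level_ties : List (List (String × Int)) → Bool
  | [] => false
  | d :: rest =>
    if d.isEmpty then has_edit_level_ties rest
    else
      match PySem.List.max? (d.map (·.2)) (fun y => y) with
      | none => has_edit_level_ties rest   -- unreachable: d nonempty
      | some max_count =>
        let max_labels := (d.filter (fun p => p.2 == max_count)).map (·.1)
        if 1 < max_labels.length then true else has_edit_level_ties rest

-- ===== PORT B =====
-- for edit_counts in edit_labels: skip empty; vals = sorted(values, reverse=True);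
-- tie if len(vals) >= 2 and vals[0] == vals[1]
def has_edit_level_ties_alt : List (List (String × Int)) → Bool
  | [] => false
  | d :: rest =>
    if d.isEmpty then has_edit_level_ties_alt rest
    else
      match PySem.List.sorted (d.map (·.2)) (fun y => y) true with
      | a :: b :: _ => if a == b then true else has_edit_level_ties_alt rest
      | _ => has_edit_level_ties_alt rest

-- ===== PRECONDITION & SPEC =====
def Spec_has_edit_level_ties (edit_labels : List (List (String × Int))) (out : Bool) : Prop := out = has_edit_level_ties_alt edit_labels
instance (edit_labels : List (List (String × Int))) (out : Bool) : Decidable (Spec_has_edit_level_ties edit_labels out) := by unfold Spec_has_edit_level_ties; infer_instance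

-- ===== CLAIM (what is proved, stated in full; the proofs are below) =====
def Claim_equal_has_edit_level_ties : Prop := ∀ (edit_labels : List (List (String × Int))), Dom_has_edit_level_ties edit_labels → Spec_has_edit_level_ties edit_labels (has_edit_level_ties edit_labels)

-- ===== LEMMAS AND PROOFS =====

lemma filter_len_eq_count (d : List (String × Int)) (m : Int) :
    (d.filter (fun p => p.2 == m)).length = (d.map (·.2)).count m := by
  induction d with
  | nil => rfl
  | cons p d ih =>
    by_cases h : p.2 = m <;> simp [h, ih]

-- The head of the reverse-sorted values is the maximum.
lemma head_sorted_rev_eq_max (vs : List Int) (m a : Int) (t : List Int)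
    (hmax : PySem.List.max? vs (fun y => y) = some m)
    (hs : PySem.List.sorted vs (fun y => y) true = a :: t) : a = m := by
  have ha : a ∈ vs := by
    have := PySem.List.sorted_perm vs (fun y => y) true
    rw [hs] at this
    exact this.mem_iff.mp (by simp)
  have h1 : a ≤ m := PySem.List.max?_isMax hmax a ha
  have h2 : m ≤ a := PySem.List.key_head_sorted_rev_ge vs (fun y => y) hs m (PySem.List.max?_mem hmax)
  omega

-- "more than one entry attains the max" = "the two largest sorted-desc values are equal"
lemma tie_cond_eq (d : List (String × Int)) (m : Int)
    (hmax : PySem.List.max? (d.map (·.2)) (fun y => y) = some m) :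
    (1 < (d.filter (fun p => p.2 == m)).length) ↔
      (∃ b t, PySem.List.sorted (d.map (·.2)) (fun y => y) true = m :: b :: t ∧ b = m) := by
  set vs := d.map (·.2) with hvs
  have hcnt : (d.filter (fun p => p.2 == m)).length = vs.count m := by
    rw [hvs]; exact filter_len_eq_count d m
  have hperm : (PySem.List.sorted vs (fun y => y) true).Perm vs :=
    PySem.List.sorted_perm vs (fun y => y) true
  cases hs : PySem.List.sorted vs (fun y => y) true with
  | nil =>
    rw [hs] at hperm
    have hnil : vs = [] := hperm.symm.eq_nil
    rw [hnil] at hmax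
    simp [PySem.List.max?] at hmax
  | cons a t =>
    have ham : a = m := head_sorted_rev_eq_max vs m a t hmax hs
    subst ham
    have hcount : vs.count a = 1 + t.count a := by
      have hc := hperm.count_eq a
      rw [hs] at hc
      simp at hc
      omega
    have hpw : (a :: t).Pairwise (fun x y => (fun y => y) y ≤ (fun y => y) x) := by
      rw [← hs]; exact PySem.List.sorted_pairwise_rev vs (fun y => y)
    constructor
    · intro h
      rw [hcnt, hcount] at h
      have hmem : a ∈ t := List.count_pos_iff.mp (by omega)
      cases t with
      | nil => simp at hmem
      | cons b t' =>
        refine ⟨b, t', rfl, ?_⟩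
        have hba : ∀ y ∈ b :: t', y ≤ b := by
          have hpt := (List.pairwise_cons.mp hpw).2
          intro y hy
          rcases List.mem_cons.mp hy with rfl | hy'
          · exact le_refl y
          · exact (List.pairwise_cons.mp hpt).1 y hy'
        have h1 : a ≤ b := hba a hmem
        have h2 : b ≤ a := (List.pairwise_cons.mp hpw).1 b (by simp)
        omega
    · rintro ⟨c, t2, heq, hc⟩
      subst hc
      injection heq with h1 h2
      rw [hcnt, hcount, h2]
      have hpos : 0 < List.count c (c :: t2) := List.count_pos_iff.mpr (by simp)
      omega

lemma ties_eq (xs : List (List (String × Int))) :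
    has_edit_level_ties xs = has_edit_level_ties_alt xs := by
  induction xs with
  | nil => rfl
  | cons d rest ih =>
    by_cases hd : d.isEmpty
    · simp [has_edit_level_ties, has_edit_level_ties_alt, hd, ih]
    · cases hmax : PySem.List.max? (d.map (·.2)) (fun y => y) with
      | none =>
        have h1 : d.map (·.2) = [] := (PySem.List.max?_eq_none_iff _ _).mp hmax
        have h2 : d = [] := by simpa using h1
        simp [h2] at hd
      | some m =>
        have hiff := tie_cond_eq d m hmax
        cases hs : PySem.List.sorted (d.map (·.2)) (fun y => y) true with
        | nil =>
          have hperm := PySem.List.sorted_perm (d.map (·.2)) (fun y => y) true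
          rw [hs] at hperm
          have h1 : d.map (·.2) = [] := hperm.symm.eq_nil
          have h2 : d = [] := by simpa using h1
          simp [h2] at hd
        | cons a t =>
          have ham : a = m := head_sorted_rev_eq_max _ m a t hmax hs
          subst ham
          cases t with
          | nil =>
            have hnot : ¬ (1 < (d.filter (fun p => p.2 == a)).length) := by
              intro h
              rcases hiff.mp h with ⟨b, t', heq, _⟩
              rw [hs] at heq; simp at heq
            simp [has_edit_level_ties, has_edit_level_ties_alt, hd, hmax, hs, hnot, ih]
          | cons b t' =>
            by_cases hb : b = a
            · subst hb
              have h1 : 1 < (d.filter (fun p => p.2 == b)).length :=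
                hiff.mpr ⟨b, t', hs, rfl⟩
              simp [has_edit_level_ties, has_edit_level_ties_alt, hd, hmax, hs, h1]
            · have hnot : ¬ (1 < (d.filter (fun p => p.2 == a)).length) := by
                intro h
                rcases hiff.mp h with ⟨b2, t2, heq, hb2⟩
                rw [hs] at heq
                injection heq with _ h2
                injection h2 with h3 _
                exact hb (h3.trans hb2)
              have hab : a ≠ b := fun h => hb h.symm
              simp [has_edit_level_ties, has_edit_level_ties_alt, hd, hmax, hs, hnot, hab, ih]

-- ===== VERDICT (by name: the statement is the Claim_ definition above) =====
theorem has_edit_level_ties_spec : Claim_equal_has_edit_level_ties := by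
  intro xs _
  unfold Spec_has_edit_level_ties
  exact ties_eq xs
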